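-- pv_equiv track=rewrite | github.com/lightvector/KataGo | python/elo.py | has_only_factors_of_2_and_3
-- ===== SOURCE A (Python) =====
-- def has_only_factors_of_2_and_3(n: int) -> bool:
--     while n > 1:
--         if n % 2 == 0:
--             n //= 2
--         elif n % 3 == 0:
--             n //= 3
--         else:
--             return False
--     return True
-- ===== SOURCE B (Python) =====
-- def has_only_factors_of_2_and_3(n: int) -> bool:
--     # n > 1 has only prime factors 2 and 3  iff  n divides 6**k for k = n.bit_length():
--     # if n = 2**a * 3**b then a, b < k so n | 6**k; conversely any divisor of a power
--     # of 6 has no prime factor other than 2 and 3.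
--     if n <= 1:
--         return True
--     return pow(6, n.bit_length(), n) == 0
-- ===== Notes on version B (the rewrite author's own statement) =====
-- stated objective: alternative
-- what changed: Replaces A's repeated-division loop with a single divisibility test: n > 1 is 3-smooth iff n divides 6**bit_length(n), checked with one modular exponentiation pow(6, k, n) == 0 and no division loop at all.
import Mathlib
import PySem

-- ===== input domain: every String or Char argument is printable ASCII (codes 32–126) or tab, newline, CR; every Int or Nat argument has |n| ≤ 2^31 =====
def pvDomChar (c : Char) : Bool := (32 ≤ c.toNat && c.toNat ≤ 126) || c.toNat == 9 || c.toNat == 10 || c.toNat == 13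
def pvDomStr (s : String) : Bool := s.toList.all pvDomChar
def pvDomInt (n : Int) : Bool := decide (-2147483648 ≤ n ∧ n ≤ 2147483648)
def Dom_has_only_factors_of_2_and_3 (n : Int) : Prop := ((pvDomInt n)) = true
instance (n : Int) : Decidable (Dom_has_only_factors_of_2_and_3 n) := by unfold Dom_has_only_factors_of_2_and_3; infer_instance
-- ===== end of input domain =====

-- B replaces A's repeated-division loop with a single divisibility test (n > 1 is 3-smooth iff n divides 6^bit_length(n)), via one modular exponentiation; alternative algorithm, same cost class.


-- ===== PORT A =====
-- while n > 1: divide by 2 if even, else by 3 if divisible, else return False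
def has_only_factors_of_2_and_3 (n : Int) : Bool :=
  if _h : 1 < n then
    if PySem.Int.mod n 2 = 0 then
      has_only_factors_of_2_and_3 (PySem.Int.floordiv n 2)
    else if PySem.Int.mod n 3 = 0 then
      has_only_factors_of_2_and_3 (PySem.Int.floordiv n 3)
    else false
  else true
termination_by n.toNat
decreasing_by
  · rw [PySem.Int.floordiv_eq_ediv_of_pos (by norm_num)]; omega
  · rw [PySem.Int.floordiv_eq_ediv_of_pos (by norm_num)]; omega

-- ===== PORT B =====
-- if n <= 1: return True; return pow(6, n.bit_length(), n) == 0
-- (Python n.bit_length() for n ≥ 2 is Nat.log2 n + 1; pow(6, k, n) is 6^k mod n)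
def has_only_factors_of_2_and_3_alt (n : Int) : Bool :=
  if n ≤ 1 then true
  else PySem.Int.mod ((6 : Int) ^ (n.toNat.log2 + 1)) n == 0

-- ===== PRECONDITION & SPEC =====
def Spec_has_only_factors_of_2_and_3 (n : Int) (out : Bool) : Prop := out = has_only_factors_of_2_and_3_alt n
instance (n : Int) (out : Bool) : Decidable (Spec_has_only_factors_of_2_and_3 n out) := by unfold Spec_has_only_factors_of_2_and_3; infer_instance

-- ===== CLAIM (what is proved, stated in full; the proofs are below) =====
def Claim_equal_has_only_factors_of_2_and_3 : Prop := ∀ (n : Int), Dom_has_only_factors_of_2_and_3 n → Spec_has_only_factors_of_2_and_3 n (has_only_factors_of_2_and_3 n)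

-- ===== LEMMAS AND PROOFS =====

-- If A returns true on m ≥ 1, then m = 2^a * 3^b with both powers bounded by m.
theorem pvA_true_smooth : ∀ (fuel m : Nat), m ≤ fuel → 1 ≤ m →
    has_only_factors_of_2_and_3 (m : Int) = true →
    ∃ a b : Nat, m = 2 ^ a * 3 ^ b ∧ 2 ^ a ≤ m ∧ 3 ^ b ≤ m := by
  intro fuel
  induction fuel with
  | zero => intro m hm h1 _; omega
  | succ fuel ih =>
    intro m hm h1 hA
    by_cases hm1 : m = 1
    · exact ⟨0, 0, by omega, by omega, by omega⟩
    · have h2m : 2 ≤ m := by omega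
      rw [has_only_factors_of_2_and_3] at hA
      rw [dif_pos (by exact_mod_cast (by omega : (1:Int) < m))] at hA
      rw [PySem.Int.mod_eq_emod_of_pos (by norm_num),
          PySem.Int.mod_eq_emod_of_pos (by norm_num),
          PySem.Int.floordiv_eq_ediv_of_pos (by norm_num),
          PySem.Int.floordiv_eq_ediv_of_pos (by norm_num)] at hA
      by_cases h2 : m % 2 = 0
      · rw [if_pos (by exact_mod_cast congrArg (Nat.cast : Nat → Int) h2)] at hA
        have hcast : ((m : Int) / 2) = ((m / 2 : Nat) : Int) := by
          omega
        rw [hcast] at hA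
        obtain ⟨a, b, heq, h2a, h3b⟩ := ih (m / 2) (by omega) (by omega) hA
        refine ⟨a + 1, b, ?_, ?_, ?_⟩
        · have : m = 2 * (m / 2) := by omega
          rw [this, heq]; ring
        · have : m = 2 * (m / 2) := by omega
          calc 2 ^ (a + 1) = 2 * 2 ^ a := by ring
          _ ≤ 2 * (m / 2) := by omega
          _ = m := this.symm
        · omega
      · rw [if_neg (by exact_mod_cast fun h => h2 (by exact_mod_cast h))] at hA
        by_cases h3 : m % 3 = 0
        · rw [if_pos (by exact_mod_cast congrArg (Nat.cast : Nat → Int) h3)] at hA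
          have hcast : ((m : Int) / 3) = ((m / 3 : Nat) : Int) := by
            omega
          rw [hcast] at hA
          obtain ⟨a, b, heq, h2a, h3b⟩ := ih (m / 3) (by omega) (by omega) hA
          refine ⟨a, b + 1, ?_, ?_, ?_⟩
          · have : m = 3 * (m / 3) := by omega
            rw [this, heq]; ring
          · omega
          · have : m = 3 * (m / 3) := by omega
            calc 3 ^ (b + 1) = 3 * 3 ^ b := by ring
            _ ≤ 3 * (m / 3) := by omega
            _ = m := this.symm
        · rw [if_neg (by exact_mod_cast fun h => h3 (by exact_mod_cast h))] at hA
          exact absurd hA (by simp)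

-- If m ≥ 1 divides a power of 6, A returns true on m.
theorem pvDvd_A_true : ∀ (fuel m j : Nat), m ≤ fuel → 1 ≤ m → m ∣ 6 ^ j →
    has_only_factors_of_2_and_3 (m : Int) = true := by
  intro fuel
  induction fuel with
  | zero => intro m j hm h1 _; omega
  | succ fuel ih =>
    intro m j hm h1 hd
    by_cases hm1 : m = 1
    · rw [has_only_factors_of_2_and_3, hm1]
      norm_num
    · have h2m : 2 ≤ m := by omega
      rw [has_only_factors_of_2_and_3]
      rw [dif_pos (by exact_mod_cast (by omega : (1:Int) < m))]
      rw [PySem.Int.mod_eq_emod_of_pos (by norm_num),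
          PySem.Int.mod_eq_emod_of_pos (by norm_num),
          PySem.Int.floordiv_eq_ediv_of_pos (by norm_num),
          PySem.Int.floordiv_eq_ediv_of_pos (by norm_num)]
      by_cases h2 : m % 2 = 0
      · rw [if_pos (by exact_mod_cast congrArg (Nat.cast : Nat → Int) h2)]
        have hcast : ((m : Int) / 2) = ((m / 2 : Nat) : Int) := by
          omega
        rw [hcast]
        exact ih (m / 2) j (by omega) (by omega)
          (dvd_trans (Nat.div_dvd_of_dvd (by omega)) hd)
      · rw [if_neg (by exact_mod_cast fun h => h2 (by exact_mod_cast h))]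
        by_cases h3 : m % 3 = 0
        · rw [if_pos (by exact_mod_cast congrArg (Nat.cast : Nat → Int) h3)]
          have hcast : ((m : Int) / 3) = ((m / 3 : Nat) : Int) := by
            omega
          rw [hcast]
          exact ih (m / 3) j (by omega) (by omega)
            (dvd_trans (Nat.div_dvd_of_dvd (by omega)) hd)
        · -- m coprime to 6 and m ∣ 6^j forces m = 1, contradiction
          exfalso
          have hc2 : Nat.Coprime m 2 :=
            Nat.coprime_comm.mp ((Nat.Prime.coprime_iff_not_dvd Nat.prime_two).mpr
              (fun h => h2 (by omega)))
          have hc3 : Nat.Coprime m 3 :=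
            Nat.coprime_comm.mp ((Nat.Prime.coprime_iff_not_dvd Nat.prime_three).mpr
              (fun h => h3 (by omega)))
          have hc6 : Nat.Coprime m 6 := by
            have := Nat.Coprime.mul_right hc2 hc3
            simpa using this
          exact hm1 ((Nat.Coprime.pow_right j hc6).eq_one_of_dvd hd)

-- ===== VERDICT (by name: the statement is the Claim_ definition above) =====
theorem has_only_factors_of_2_and_3_spec : Claim_equal_has_only_factors_of_2_and_3 := by
  intro n _
  unfold Spec_has_only_factors_of_2_and_3 has_only_factors_of_2_and_3_alt
  by_cases h : n ≤ 1
  · rw [if_pos h, has_only_factors_of_2_and_3]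
    simp [show ¬ 1 < n from by omega]
  · rw [if_neg h]
    have h1 : 1 < n := by omega
    set m := n.toNat with hm
    have hn : (m : Int) = n := by omega
    set K := m.log2 + 1 with hK
    have hmod : (PySem.Int.mod ((6 : Int) ^ K) n = 0) ↔ m ∣ 6 ^ K := by
      rw [PySem.Int.mod_eq_emod_of_pos (by omega)]
      constructor
      · intro he
        have : n ∣ (6 : Int) ^ K := Int.dvd_of_emod_eq_zero he
        rw [← hn] at this
        exact_mod_cast this
      · intro hd
        apply Int.emod_eq_zero_of_dvd
        rw [← hn]
        exact_mod_cast hd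
    by_cases hA : has_only_factors_of_2_and_3 n = true
    · rw [hA]
      obtain ⟨a, b, heq, h2a, h3b⟩ := pvA_true_smooth m m le_rfl (by omega) (by rwa [hn])
      have hmK : m < 2 ^ K := Nat.lt_log2_self
      have ha : a ≤ K := by
        by_contra hc
        have : 2 ^ K < 2 ^ a := Nat.pow_lt_pow_right (by norm_num) (by omega)
        omega
      have hb : b ≤ K := by
        have h23 : 2 ^ b ≤ 3 ^ b := Nat.pow_le_pow_left (by norm_num) b
        by_contra hc
        have : 2 ^ K < 2 ^ b := Nat.pow_lt_pow_right (by norm_num) (by omega)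
        omega
      have hdvd : m ∣ 6 ^ K := by
        rw [heq, show (6 : Nat) ^ K = 2 ^ K * 3 ^ K by rw [← Nat.mul_pow]]
        exact mul_dvd_mul (Nat.pow_dvd_pow 2 ha) (Nat.pow_dvd_pow 3 hb)
      simp [hmod.mpr hdvd]
    · have hA' : has_only_factors_of_2_and_3 n = false := by
        cases hh : has_only_factors_of_2_and_3 n
        · rfl
        · exact absurd hh hA
      rw [hA']
      have hnd : ¬ m ∣ 6 ^ K := by
        intro hd
        exact hA (by rw [← hn]; exact pvDvd_A_true m m K le_rfl (by omega) hd)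
      have : ¬ PySem.Int.mod ((6 : Int) ^ K) n = 0 := fun he => hnd (hmod.mp he)
      simp [this]
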